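-- pv_equiv track=rewrite | github.com/ajhofmann/Poker | Poker.py | isroyalflush
-- ===== SOURCE A (Python) =====
-- cards = ['A', 'K', 'Q', 'J', 'T', '9', '8', '7', '6', '5', '4', '3', '2']
--
-- def isflush(hand):
--     if hand[1] == hand[3] and hand[3] == hand[5] and hand[5] == hand[7] and hand[7] == hand[9]:
--         return True
--     return False
--
-- def isroyalflush(hand):
--     if isflush(hand):
--         count = 0
--         for i in range(5):
--             if cards[i] in hand:
--                 count += 1
--         return count == 5
--     return False
-- ===== SOURCE B (Python) =====
-- ROYAL = 'AKQJT'
--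
-- def isroyalflush(hand):
--     if any(hand[i] != hand[1] for i in (3, 5, 7, 9)):
--         return False
--     missing = set(ROYAL)
--     for ch in hand:
--         missing.discard(ch)
--     return not missing
-- ===== Notes on version B (the rewrite author's own statement) =====
-- stated objective: alternative
-- what changed: B inverts the royal-rank check: instead of A's count-to-5 loop that scans the whole hand once per royal rank, B makes a single pass over the hand, depleting a set initialised to the five royal ranks and testing it for emptiness; the flush test compares each odd-position suit against hand[1] with a short-circuiting any() instead of A's chained pairwise equalities.
import Mathlib
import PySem

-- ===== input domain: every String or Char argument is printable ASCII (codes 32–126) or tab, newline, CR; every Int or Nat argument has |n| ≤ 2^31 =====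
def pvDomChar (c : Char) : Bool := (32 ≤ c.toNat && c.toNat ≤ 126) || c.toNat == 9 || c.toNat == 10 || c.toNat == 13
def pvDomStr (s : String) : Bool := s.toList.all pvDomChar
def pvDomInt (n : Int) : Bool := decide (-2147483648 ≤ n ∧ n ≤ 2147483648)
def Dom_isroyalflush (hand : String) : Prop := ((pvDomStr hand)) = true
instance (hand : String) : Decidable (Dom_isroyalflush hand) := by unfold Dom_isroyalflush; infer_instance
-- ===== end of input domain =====

-- B replaces A's five whole-string membership scans by one pass depleting a set of still-missing royal ranks,
-- and A's chained pairwise suit comparisons by an any() against hand[1] (objective: alternative).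


-- ===== PORT A =====
-- cards = ['A', 'K', 'Q', 'J', 'T', '9', '8', '7', '6', '5', '4', '3', '2']
def pvCards : List String := ["A", "K", "Q", "J", "T", "9", "8", "7", "6", "5", "4", "3", "2"]

-- isflush: the short-circuiting chain hand[1]==hand[3] and hand[3]==hand[5] and … ;
-- a `none` from pyGet? is Python's IndexError (excluded by Pre_isroyalflush).
def isflush (hand : String) : Bool :=
  match PySem.Str.pyGet? hand 1, PySem.Str.pyGet? hand 3 with
  | some c1, some c3 =>
    if c1 = c3 then
      match PySem.Str.pyGet? hand 5 with
      | some c5 =>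
        if c3 = c5 then
          match PySem.Str.pyGet? hand 7 with
          | some c7 =>
            if c5 = c7 then
              match PySem.Str.pyGet? hand 9 with
              | some c9 => decide (c7 = c9)
              | none => false
            else false
          | none => false
        else false
      | none => false
    else false
  | _, _ => false

def isroyalflush (hand : String) : Bool :=
  if isflush hand then
    let count : Int :=
      (PySem.List.pyRange 0 5 1).foldl
        (fun count i =>
          if PySem.Str.isIn (PySem.List.pyGetD pvCards i "") hand then count + 1 else count)
        0
    decide (count = 5)
  else false

-- ===== PORT B =====
-- ROYAL = 'AKQJT'
def pvRoyal : List Char := ['A', 'K', 'Q', 'J', 'T']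

-- any(hand[i] != hand[1] for i in (3, 5, 7, 9)), short-circuiting left to right;
-- `none` = IndexError on an out-of-range read (excluded by Pre_isroyalflush).
def altAnyNe (hand : String) : Option Bool :=
  match PySem.Str.pyGet? hand 3, PySem.Str.pyGet? hand 1 with
  | some c3, some c1 =>
    if c3 ≠ c1 then some true else
      match PySem.Str.pyGet? hand 5 with
      | some c5 =>
        if c5 ≠ c1 then some true else
          match PySem.Str.pyGet? hand 7 with
          | some c7 =>
            if c7 ≠ c1 then some true else
              match PySem.Str.pyGet? hand 9 with
              | some c9 => some (decide (c9 ≠ c1))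
              | none => none
          | none => none
      | none => none
  | _, _ => none

def isroyalflush_alt (hand : String) : Bool :=
  match altAnyNe hand with
  | some true => false
  | some false =>
    -- missing = set(ROYAL); for ch in hand: missing.discard(ch); return not missing
    let missing := hand.toList.foldl (fun m ch => PySem.Set.discard m ch)
      (PySem.Set.ofList pvRoyal)
    decide (missing = [])
  | none => false   -- IndexError path (outside Pre_isroyalflush)

-- ===== PRECONDITION & SPEC =====
-- Pre_ is exactly the set of inputs on which the Python A returns: A raises IndexError when
-- the short-circuiting comparison chain of isflush reaches an index past the end of the string.
def Pre_isroyalflush (hand : String) : Prop :=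
  10 ≤ hand.toList.length
  ∨ (4 ≤ hand.toList.length ∧ hand.toList.getD 1 ' ' ≠ hand.toList.getD 3 ' ')
  ∨ (6 ≤ hand.toList.length ∧ hand.toList.getD 1 ' ' = hand.toList.getD 3 ' '
      ∧ hand.toList.getD 3 ' ' ≠ hand.toList.getD 5 ' ')
  ∨ (8 ≤ hand.toList.length ∧ hand.toList.getD 1 ' ' = hand.toList.getD 3 ' '
      ∧ hand.toList.getD 3 ' ' = hand.toList.getD 5 ' '
      ∧ hand.toList.getD 5 ' ' ≠ hand.toList.getD 7 ' ')

instance (hand : String) : Decidable (Pre_isroyalflush hand) := by unfold Pre_isroyalflush; infer_instance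

def pvWitness_isroyalflush : String := "AsKsQsJsTs"

def Spec_isroyalflush (hand : String) (out : Bool) : Prop := out = isroyalflush_alt hand
instance (hand : String) (out : Bool) : Decidable (Spec_isroyalflush hand out) := by unfold Spec_isroyalflush; infer_instance

-- ===== CLAIM (what is proved, stated in full; the proofs are below) =====
def Claim_equal_isroyalflush : Prop := ∀ (hand : String), Dom_isroyalflush hand → Pre_isroyalflush hand → Spec_isroyalflush hand (isroyalflush hand)

-- ===== LEMMAS AND PROOFS =====

lemma singleton_infix_iff (a : Char) (l : List Char) : [a] <:+: l ↔ a ∈ l := by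
  constructor
  · intro h; exact (List.singleton_sublist).mp h.sublist
  · intro h
    obtain ⟨s, t, hl⟩ := List.append_of_mem h
    exact ⟨s, t, by simp [hl]⟩

-- A's membership test `cards[i] in hand` for a single-character string
lemma hbit (hand : String) : ∀ (c : Char) (s : String), s.toList = [c] →
    PySem.Str.isIn s hand = decide (c ∈ hand.toList) := by
  intro c s hs
  rw [Bool.eq_iff_iff, PySem.Str.isIn_iff_infix, hs, decide_eq_true_iff]
  exact singleton_infix_iff c hand.toList

lemma anyNe_decide (c1 c3 c5 c7 c9 : Char) :
    (if c3 ≠ c1 then some true else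
      if c5 ≠ c1 then some true else
        if c7 ≠ c1 then some true else some (decide (c9 ≠ c1)))
      = some (decide (¬(c1 = c3 ∧ c3 = c5 ∧ c5 = c7 ∧ c7 = c9))) := by
  by_cases h13 : c1 = c3 <;> by_cases h35 : c3 = c5 <;>
    by_cases h57 : c5 = c7 <;> by_cases h79 : c7 = c9 <;>
    simp_all [eq_comm]

-- the depletion pass: what remains in the missing set after scanning l
lemma mem_foldl_discard (l : List Char) : ∀ (m : PySem.Set Char) (c : Char),
    (c ∈ l.foldl (fun m ch => PySem.Set.discard m ch) m ↔ c ∈ m ∧ c ∉ l) := by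
  induction l with
  | nil => intro m c; simp
  | cons ch rest ih =>
    intro m c
    rw [List.foldl_cons, ih, PySem.Set.mem_discard]
    simp only [List.mem_cons]
    tauto

-- B's final emptiness test, in terms of membership in the hand
lemma missing_empty_iff (hand : String) :
    (hand.toList.foldl (fun m ch => PySem.Set.discard m ch) (PySem.Set.ofList pvRoyal) = []) ↔
      ('A' ∈ hand.toList ∧ 'K' ∈ hand.toList ∧ 'Q' ∈ hand.toList ∧
        'J' ∈ hand.toList ∧ 'T' ∈ hand.toList) := by
  rw [List.eq_nil_iff_forall_not_mem]
  constructor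
  · intro h
    refine ⟨?_, ?_, ?_, ?_, ?_⟩ <;> by_contra hc
    · exact h 'A' ((mem_foldl_discard _ _ _).mpr ⟨by decide, hc⟩)
    · exact h 'K' ((mem_foldl_discard _ _ _).mpr ⟨by decide, hc⟩)
    · exact h 'Q' ((mem_foldl_discard _ _ _).mpr ⟨by decide, hc⟩)
    · exact h 'J' ((mem_foldl_discard _ _ _).mpr ⟨by decide, hc⟩)
    · exact h 'T' ((mem_foldl_discard _ _ _).mpr ⟨by decide, hc⟩)
  · rintro ⟨hA, hK, hQ, hJ, hT⟩ c hc
    obtain ⟨h1, h2⟩ := (mem_foldl_discard _ _ _).mp hc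
    have hcr : c ∈ pvRoyal := (PySem.Set.mem_ofList _ _).mp h1
    simp only [pvRoyal, List.mem_cons, List.not_mem_nil, or_false] at hcr
    rcases hcr with rfl | rfl | rfl | rfl | rfl <;> exact h2 (by assumption)

theorem main (hand : String) (hpre : Pre_isroyalflush hand) :
    isroyalflush hand = isroyalflush_alt hand := by
  have h4 : 4 ≤ hand.toList.length := by
    rcases hpre with h | ⟨h, _⟩ | ⟨h, _⟩ | ⟨h, _⟩ <;> omega
  have hget : ∀ i : Nat, i < hand.toList.length →
      PySem.Str.pyGet? hand (i : Int) = some (hand.toList.getD i ' ') := by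
    intro i hi
    show PySem.Chars.pyGet? hand.toList (i : Int) = _
    rw [PySem.Chars.pyGet?, PySem.List.pyGet?_natCast, List.getElem?_eq_getElem hi,
      List.getD_eq_getElem _ _ hi]
  have e1 : PySem.Str.pyGet? hand 1 = some (hand.toList.getD 1 ' ') := by
    simpa using hget 1 (by omega)
  have e3 : PySem.Str.pyGet? hand 3 = some (hand.toList.getD 3 ' ') := by
    simpa using hget 3 (by omega)
  rcases hpre with h10 | ⟨hn, hne⟩ | ⟨hn, heq1, hne⟩ | ⟨hn, heq1, heq2, hne⟩
  · -- main case: the whole chain is inspected on both sides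
    have e5 : PySem.Str.pyGet? hand 5 = some (hand.toList.getD 5 ' ') := by
      simpa using hget 5 (by omega)
    have e7 : PySem.Str.pyGet? hand 7 = some (hand.toList.getD 7 ' ') := by
      simpa using hget 7 (by omega)
    have e9 : PySem.Str.pyGet? hand 9 = some (hand.toList.getD 9 ' ') := by
      simpa using hget 9 (by omega)
    set d1 := hand.toList.getD 1 ' ' with hd1
    set d3 := hand.toList.getD 3 ' ' with hd3
    set d5 := hand.toList.getD 5 ' ' with hd5
    set d7 := hand.toList.getD 7 ' ' with hd7
    set d9 := hand.toList.getD 9 ' ' with hd9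
    have hAflush : isflush hand = decide (d1 = d3 ∧ d3 = d5 ∧ d5 = d7 ∧ d7 = d9) := by
      unfold isflush
      simp only [e1, e3, e5, e7, e9]
      split_ifs <;> simp_all
    have hBany : altAnyNe hand = some (decide (¬(d1 = d3 ∧ d3 = d5 ∧ d5 = d7 ∧ d7 = d9))) := by
      unfold altAnyNe
      simp only [e1, e3, e5, e7, e9]
      exact anyNe_decide d1 d3 d5 d7 d9
    rw [isroyalflush, isroyalflush_alt, hAflush, hBany]
    by_cases hch : d1 = d3 ∧ d3 = d5 ∧ d5 = d7 ∧ d7 = d9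
    · rw [decide_eq_true hch, decide_eq_false (not_not_intro hch)]
      simp only [if_true]
      have hrange : PySem.List.pyRange 0 5 1 = [0, 1, 2, 3, 4] := by decide
      have g0' : PySem.List.pyGetD pvCards 0 "" = "A" := by decide
      have g1' : PySem.List.pyGetD pvCards 1 "" = "K" := by decide
      have g2' : PySem.List.pyGetD pvCards 2 "" = "Q" := by decide
      have g3' : PySem.List.pyGetD pvCards 3 "" = "J" := by decide
      have g4' : PySem.List.pyGetD pvCards 4 "" = "T" := by decide
      have hmiss : (decide ((hand.toList.foldl (fun m ch => PySem.Set.discard m ch)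
            (PySem.Set.ofList pvRoyal)) = []))
          = decide ('A' ∈ hand.toList ∧ 'K' ∈ hand.toList ∧ 'Q' ∈ hand.toList ∧
              'J' ∈ hand.toList ∧ 'T' ∈ hand.toList) :=
        decide_eq_decide.mpr (missing_empty_iff hand)
      simp only [hmiss]
      rw [hrange]
      simp only [List.foldl, g0', g1', g2', g3', g4',
        hbit hand 'A' "A" (by decide), hbit hand 'K' "K" (by decide),
        hbit hand 'Q' "Q" (by decide), hbit hand 'J' "J" (by decide),
        hbit hand 'T' "T" (by decide)]
      by_cases mA : 'A' ∈ hand.toList <;> by_cases mK : 'K' ∈ hand.toList <;>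
        by_cases mQ : 'Q' ∈ hand.toList <;> by_cases mJ : 'J' ∈ hand.toList <;>
        by_cases mT : 'T' ∈ hand.toList <;>
        simp [mA, mK, mQ, mJ, mT]
    · rw [decide_eq_false hch, decide_eq_true hch]
      simp
  · -- short-circuit: hand[1] != hand[3]; both sides stop at the first comparison
    have hA : isflush hand = false := by
      unfold isflush
      simp only [e1, e3]
      rw [if_neg hne]
    have hB : altAnyNe hand = some true := by
      unfold altAnyNe
      simp only [e1, e3]
      rw [if_pos (Ne.symm hne)]
    rw [isroyalflush, isroyalflush_alt, hA, hB]
    simp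
  · -- short-circuit: hand[3] != hand[5]
    have e5 : PySem.Str.pyGet? hand 5 = some (hand.toList.getD 5 ' ') := by
      simpa using hget 5 (by omega)
    have hA : isflush hand = false := by
      unfold isflush
      simp only [e1, e3, e5]
      rw [if_pos heq1, if_neg hne]
    have hB : altAnyNe hand = some true := by
      unfold altAnyNe
      simp only [e1, e3, e5]
      rw [if_neg (not_not_intro heq1.symm),
        if_pos (show hand.toList.getD 5 ' ' ≠ hand.toList.getD 1 ' ' from
          fun h => hne (h.trans heq1).symm)]
    rw [isroyalflush, isroyalflush_alt, hA, hB]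
    simp
  · -- short-circuit: hand[5] != hand[7]
    have e5 : PySem.Str.pyGet? hand 5 = some (hand.toList.getD 5 ' ') := by
      simpa using hget 5 (by omega)
    have e7 : PySem.Str.pyGet? hand 7 = some (hand.toList.getD 7 ' ') := by
      simpa using hget 7 (by omega)
    have hA : isflush hand = false := by
      unfold isflush
      simp only [e1, e3, e5, e7]
      rw [if_pos heq1, if_pos heq2, if_neg hne]
    have hB : altAnyNe hand = some true := by
      unfold altAnyNe
      simp only [e1, e3, e5, e7]
      rw [if_neg (not_not_intro heq1.symm),
        if_neg (not_not_intro (heq1.trans heq2).symm),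
        if_pos (show hand.toList.getD 7 ' ' ≠ hand.toList.getD 1 ' ' from
          fun h => hne ((h.trans (heq1.trans heq2)).symm))]
    rw [isroyalflush, isroyalflush_alt, hA, hB]
    simp

-- ===== VERDICT (by name: the statement is the Claim_ definition above) =====
theorem isroyalflush_spec : Claim_equal_isroyalflush := by
  intro hand _ hpre
  exact main hand hpre
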